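-- pv_equiv track=rewrite | github.com/denneyl2711/BookwormWordFinder | BookwormWordFinder/BookwormWordFinder.py | fixQsInString
-- ===== SOURCE A (Python) =====
-- def fixQsInString(word):
--     newWord = ""
--
--     #if q then add q but not the next letter
--
--     avoidNext = False
--     for letter in word:
--         if not avoidNext:
--             newWord = newWord + letter
--
--         avoidNext = False
--
--         if letter == 'q':
--             avoidNext = True
--     #don't need to worry about weird words with a q followed by a non-u because those aren't in the bookworm dictionary
--
--     return newWord
-- ===== SOURCE B (Python) =====
-- def fixQsInString(word):
--     # keep word[i] iff i == 0 or word[i-1] != 'q' (a skipped 'q' still removes its successor)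
--     return word[:1] + ''.join(c for p, c in zip(word, word[1:]) if p != 'q')
-- ===== Notes on version B (the rewrite author's own statement) =====
-- stated objective: simpler
-- what changed: Replaced the carried avoidNext boolean state machine by a stateless look-behind: keep each character unless the previous character is 'q', via zip(word, word[1:]).
import Mathlib
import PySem

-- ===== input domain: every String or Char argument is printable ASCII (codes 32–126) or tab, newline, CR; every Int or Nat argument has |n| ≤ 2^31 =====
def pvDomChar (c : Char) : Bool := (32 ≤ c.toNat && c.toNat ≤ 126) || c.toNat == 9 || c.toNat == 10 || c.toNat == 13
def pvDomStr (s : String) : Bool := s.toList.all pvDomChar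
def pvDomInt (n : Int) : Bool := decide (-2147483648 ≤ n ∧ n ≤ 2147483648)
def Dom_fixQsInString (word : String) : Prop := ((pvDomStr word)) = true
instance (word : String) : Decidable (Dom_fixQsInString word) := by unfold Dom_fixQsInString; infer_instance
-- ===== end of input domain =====

-- B replaces A's carried avoidNext boolean state machine by a stateless look-behind
-- (keep each character unless its predecessor is 'q'): simpler decomposition, same values.


-- ===== PORT A =====
-- A's loop: fold over the characters carrying (newWord, avoidNext); the accumulated
-- string is kept as a List Char (String.ofList at the end) so concatenation is exact.
def fixQsInString (word : String) : String :=
  let st := word.toList.foldl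
    (fun (st : List Char × Bool) letter =>
      let acc := if !st.2 then st.1 ++ [letter] else st.1
      (acc, letter == 'q'))
    ([], false)
  String.ofList st.1

-- ===== PORT B =====
-- Source B: word[:1] + ''.join(c for p, c in zip(word, word[1:]) if p != 'q')
def fixQsInString_alt (word : String) : String :=
  String.ofList (word.toList.take 1 ++
    ((word.toList.zip word.toList.tail).filterMap
      (fun pc => if pc.1 ≠ 'q' then some pc.2 else none)))

-- ===== PRECONDITION & SPEC =====
def Spec_fixQsInString (word : String) (out : String) : Prop := out = fixQsInString_alt word
instance (word : String) (out : String) : Decidable (Spec_fixQsInString word out) := by unfold Spec_fixQsInString; infer_instance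

-- ===== CLAIM (what is proved, stated in full; the proofs are below) =====
def Claim_equal_fixQsInString : Prop := ∀ (word : String), Dom_fixQsInString word → Spec_fixQsInString word (fixQsInString word)

-- ===== LEMMAS AND PROOFS =====

-- Reference filter: characters kept when the current skip-flag is b.
def pvKeep (b : Bool) : List Char → List Char
  | [] => []
  | c :: r => if b then pvKeep (c == 'q') r else c :: pvKeep (c == 'q') r

theorem pvFoldA (l : List Char) (p : List Char) (b : Bool) :
    (l.foldl (fun (st : List Char × Bool) letter =>
      let acc := if !st.2 then st.1 ++ [letter] else st.1
      (acc, letter == 'q')) (p, b)).1 = p ++ pvKeep b l := by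
  induction l generalizing p b with
  | nil => simp [pvKeep]
  | cons c r ih =>
    cases b with
    | false => simpa [pvKeep] using ih (p ++ [c]) (c == 'q')
    | true  => simpa [pvKeep] using ih p (c == 'q')

theorem pvZipB (r : List Char) (p : Char) :
    (((p :: r).zip r).filterMap (fun pc => if pc.1 ≠ 'q' then some pc.2 else none))
      = pvKeep (p == 'q') r := by
  induction r generalizing p with
  | nil => simp [pvKeep]
  | cons d r' ih =>
    by_cases h : p = 'q'
    · simpa [pvKeep, h] using ih d
    · simpa [pvKeep, h] using ih d

-- ===== VERDICT (by name: the statement is the Claim_ definition above) =====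
theorem fixQsInString_spec : Claim_equal_fixQsInString := by
  intro word _
  unfold Spec_fixQsInString fixQsInString fixQsInString_alt
  cases h : word.toList with
  | nil => simp
  | cons c r =>
    simp only [pvFoldA, List.nil_append, List.take, List.tail_cons, pvZipB, pvKeep]
    simp
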